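-- pv_equiv track=rewrite | github.com/happy-philosopher/flower_of_life | main.py | get_selected_petals
-- ===== SOURCE A (Python) =====
-- def get_selected_petals(num_petal, total_petals):
--     """
--
--         :param num_petal:
--         :param total_petals:
--         :return:
--     """
--     selected_petals = []
--     for i in range(1, total_petals + 1):  # заполняем список порядковыми номерами лепестков цветка
--         selected_petals.append(i)
--     remainder = num_petal % 3  # в зависимости от номера выбираем расположение лепестков в цветке
--     match remainder:
--         case 0:
--             indices = [0, 1, 3, 4]  # 1, 2, 4, 5
--         case 1:
--             indices = [0, 2, 3, 5]  # 1, 3, 4, 6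
--         case 2:
--             indices = [1, 2, 4, 5]  # 2, 3, 5, 6
--         case _:
--             raise ValueError(f"Неподдерживаемый остаток: {remainder}")
--     return [selected_petals[i] for i in indices]
-- ===== SOURCE B (Python) =====
-- def get_selected_petals(num_petal, total_petals):
--     # O(1): the selected petal numbers are fixed by num_petal % 3; no need to
--     # materialise the list 1..total_petals. A flower with fewer petals than the
--     # largest selected one has no such petal: raise IndexError, as indexing would.
--     petals = ([1, 2, 4, 5], [1, 3, 4, 6], [2, 3, 5, 6])[num_petal % 3]
--     if petals[-1] > total_petals:
--         raise IndexError("list index out of range")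
--     return petals
-- ===== Notes on version B (the rewrite author's own statement) =====
-- stated objective: faster
-- what changed: B returns the four fixed petal numbers for num_petal % 3 from a constant table instead of building the list 1..total_petals and indexing into it; Pre_ excludes exactly the inputs where A's indexing raises IndexError, and B raises IndexError there too.
import Mathlib
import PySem

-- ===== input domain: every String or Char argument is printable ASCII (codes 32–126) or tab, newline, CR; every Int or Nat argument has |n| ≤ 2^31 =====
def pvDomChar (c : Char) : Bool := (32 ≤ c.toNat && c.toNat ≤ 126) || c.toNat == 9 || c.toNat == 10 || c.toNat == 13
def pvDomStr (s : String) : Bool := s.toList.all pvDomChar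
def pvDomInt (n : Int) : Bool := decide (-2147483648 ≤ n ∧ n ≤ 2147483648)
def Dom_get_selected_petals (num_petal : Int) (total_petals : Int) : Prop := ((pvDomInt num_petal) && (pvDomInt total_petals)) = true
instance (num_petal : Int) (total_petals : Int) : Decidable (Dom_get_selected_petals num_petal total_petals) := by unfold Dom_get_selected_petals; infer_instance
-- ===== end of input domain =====

-- B replaces A's build-a-list-then-index loop with an O(1) constant table keyed by num_petal % 3; where A's indexing raises IndexError, B raises IndexError too.

-- ===== PORT A =====
def get_selected_petals (num_petal : Int) (total_petals : Int) : List Int :=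
  -- selected_petals = [1, 2, ..., total_petals]
  let selected_petals : List Int := PySem.List.pyRange 1 (total_petals + 1) 1
  let remainder : Int := PySem.Int.mod num_petal 3
  -- remainder is always in {0,1,2} for divisor 3, so the 'case _: raise' branch is unreachable
  let indices : List Int :=
    if remainder = 0 then [0, 1, 3, 4]
    else if remainder = 1 then [0, 2, 3, 5]
    else [1, 2, 4, 5]
  -- [selected_petals[i] for i in indices]; IndexError excluded by Pre_
  indices.map (fun i => PySem.List.pyGetD selected_petals i 0)

-- ===== PORT B =====
def get_selected_petals_alt (num_petal : Int) (total_petals : Int) : List Int :=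
  -- constant table keyed by num_petal % 3 (always 0, 1 or 2)
  let r := PySem.Int.mod num_petal 3
  let petals : List Int :=
    if r = 0 then [1, 2, 4, 5]
    else if r = 1 then [1, 3, 4, 6]
    else [2, 3, 5, 6]
  -- 'if petals[-1] > total_petals: raise IndexError'; the raise is outside Pre_ ([] stands for it)
  if PySem.List.pyGetD petals (-1) 0 > total_petals then []
  else petals

-- ===== PRECONDITION & SPEC =====
-- Pre_ excludes exactly the inputs where both A and B raise IndexError:
-- the largest selected petal number is 5 when num_petal % 3 == 0 and 6 otherwise.
def Pre_get_selected_petals (num_petal : Int) (total_petals : Int) : Prop :=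
  if PySem.Int.mod num_petal 3 = 0 then 5 ≤ total_petals else 6 ≤ total_petals
instance (num_petal : Int) (total_petals : Int) : Decidable (Pre_get_selected_petals num_petal total_petals) := by
  unfold Pre_get_selected_petals; infer_instance

def pvWitness_get_selected_petals : Int × Int := (1, 6)

def Spec_get_selected_petals (num_petal : Int) (total_petals : Int) (out : List Int) : Prop :=
  out = get_selected_petals_alt num_petal total_petals
instance (num_petal : Int) (total_petals : Int) (out : List Int) : Decidable (Spec_get_selected_petals num_petal total_petals out) := by
  unfold Spec_get_selected_petals; infer_instance

-- ===== CLAIM (what is proved, stated in full; the proofs are below) =====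
def Claim_equal_get_selected_petals : Prop := ∀ (num_petal : Int) (total_petals : Int), Dom_get_selected_petals num_petal total_petals → Pre_get_selected_petals num_petal total_petals → Spec_get_selected_petals num_petal total_petals (get_selected_petals num_petal total_petals)

-- ===== LEMMAS AND PROOFS =====

-- the petal list [1 .. t] at a valid index i holds i + 1
theorem petal_at (t i : Int) (h0 : 0 ≤ i) (h1 : i < t) :
    PySem.List.pyGetD (PySem.List.pyRange 1 (t + 1) 1) i 0 = i + 1 := by
  rw [PySem.List.pyGetD_eq_getElem _ _ h0
    (by rw [PySem.List.length_pyRange_one]; omega)]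
  rw [PySem.List.getElem_pyRange_one]
  omega

-- ===== VERDICT (by name: the statement is the Claim_ definition above) =====
theorem get_selected_petals_spec : Claim_equal_get_selected_petals := by
  intro n t _ hpre
  unfold Spec_get_selected_petals get_selected_petals get_selected_petals_alt
  unfold Pre_get_selected_petals at hpre
  have h0 := PySem.Int.mod_nonneg n (show (0:Int) < 3 by norm_num)
  have h1 := PySem.Int.mod_lt n (show (0:Int) < 3 by norm_num)
  have hc : PySem.Int.mod n 3 = 0 ∨ PySem.Int.mod n 3 = 1 ∨ PySem.Int.mod n 3 = 2 := by omega
  rcases hc with h | h | h <;> rw [h] at hpre ⊢ <;>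
    norm_num [PySem.List.pyGetD] at hpre ⊢ <;>
    rw [if_neg (by norm_num [PySem.List.pyGet?, PySem.List.pyIdx?]; omega)] <;>
    refine List.ext_getElem (by simp) ?_ <;> intro i hi _ <;>
    simp only [List.length_cons, List.length_nil] at hi <;>
    interval_cases i <;> simp
  all_goals first
    | exact petal_at t 0 (by omega) (by omega)
    | exact petal_at t 1 (by omega) (by omega)
    | exact petal_at t 2 (by omega) (by omega)
    | exact petal_at t 3 (by omega) (by omega)
    | exact petal_at t 4 (by omega) (by omega)
    | exact petal_at t 5 (by omega) (by omega)
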